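-- pv_equiv track=rewrite | github.com/ldcarney/Student_Work | Algorithms/String_Alignment/string_alignment.py | commonSubstrings
-- ===== SOURCE A (Python) =====
-- def commonSubstrings(x, L, a):
--
-- 	substring = []
-- 	temp = []
--
-- 	i = 0
--
-- 	#Creates string of contnous 'no op' edit operations
-- 	for op in a:
-- 		if op == 'No op':
-- 			#temporarily holds 'no op' element in array until array length is >= L
-- 			temp.append(x[i])
-- 			i += 1
--
-- 		#transfers temp to substring if >= L
-- 		elif op == 'Sub':
-- 			i += 1
-- 			if len(temp) > L:
-- 				substring.append(temp)
-- 			temp = []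
--
-- 		#transfers temp to substring if >= L
-- 		elif op == 'Delete':
-- 			i += 1
-- 			if len(temp) > L:
-- 				substring.append(temp)
-- 			temp = []
--
-- 		#transfers temp to substring if >= L
-- 		elif op == 'Insert':
-- 			if len(temp) > L:
-- 				substring.append(temp)
-- 			temp = []
--
-- 	#in case temp >= L after while loop exits
-- 	if len(temp) >= L:
-- 		substring.append(temp)
--
-- 	return substring
-- ===== SOURCE B (Python) =====
-- def commonSubstrings(x, L, a):
--     # Pass 1: scan the ops tracking only integer boundaries (start, i) in x;
--     # no characters are read here, each closed run is recorded as an index pair.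
--     bounds = []
--     start = 0
--     i = 0
--     for op in a:
--         if op == 'No op':
--             i += 1
--         elif op == 'Sub' or op == 'Delete':
--             bounds.append((start, i))
--             i += 1
--             start = i
--         elif op == 'Insert':
--             bounds.append((start, i))
--             start = i
--     # Pass 2: materialize the qualifying runs as slices of x.
--     out = [list(x[s:e]) for (s, e) in bounds if e - s > L]
--     if i - start >= L:
--         out.append(list(x[start:i]))
--     return out
-- ===== Notes on version B (the rewrite author's own statement) =====
-- stated objective: alternative
-- what changed: B never accumulates characters: pass 1 tracks only integer boundaries (start, i) of no-op runs and records each closed run as an index pair, pass 2 materializes qualifying runs as slices x[s:e]; A instead builds each run char by char and flushes it inline.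
import Mathlib
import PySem

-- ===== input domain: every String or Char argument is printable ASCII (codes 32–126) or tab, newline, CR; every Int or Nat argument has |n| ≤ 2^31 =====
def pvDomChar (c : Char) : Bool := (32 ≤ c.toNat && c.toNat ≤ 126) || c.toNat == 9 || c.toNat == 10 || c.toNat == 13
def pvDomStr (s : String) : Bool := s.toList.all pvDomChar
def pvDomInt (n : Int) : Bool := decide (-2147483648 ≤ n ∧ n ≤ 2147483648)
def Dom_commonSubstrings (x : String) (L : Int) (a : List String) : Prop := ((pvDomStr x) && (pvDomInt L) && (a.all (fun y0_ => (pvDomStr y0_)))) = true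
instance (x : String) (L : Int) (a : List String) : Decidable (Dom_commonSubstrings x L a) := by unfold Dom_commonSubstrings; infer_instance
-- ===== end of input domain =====

-- B tracks only integer run boundaries in its scan and materializes the kept runs as
-- slices of x afterwards, instead of A's char-by-char accumulation with inline flushes;
-- objective: alternative decomposition/data structure, same asymptotic cost.

-- x[i] as a 1-character string; Pre_ guarantees the index is in range wherever A reads it.
def pvChar (x : String) (i : Int) : String :=
  match PySem.Str.pyGet? x i with
  | some c => String.ofList [c]
  | none => ""

-- ===== PORT A =====
-- one loop step of A: state (substring, temp, i)
def pvAStep (x : String) (L : Int) (s : List (List String) × List String × Int) (op : String) :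
    List (List String) × List String × Int :=
  let (sub, temp, i) := s
  if op = "No op" then (sub, temp ++ [pvChar x i], i + 1)
  else if op = "Sub" then ((if L < (temp.length : Int) then sub ++ [temp] else sub), [], i + 1)
  else if op = "Delete" then ((if L < (temp.length : Int) then sub ++ [temp] else sub), [], i + 1)
  else if op = "Insert" then ((if L < (temp.length : Int) then sub ++ [temp] else sub), [], i)
  else (sub, temp, i)

def commonSubstrings (x : String) (L : Int) (a : List String) : List (List String) :=
  let st := a.foldl (pvAStep x L) ([], [], 0)
  if L ≤ (st.2.1.length : Int) then st.1 ++ [st.2.1] else st.1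

-- ===== PORT B =====
-- list(x[s:e]) : the slice of x as a list of 1-character strings
def pvRun (x : String) (s e : Int) : List String :=
  (PySem.List.slice x.toList (some s) (some e)).map (fun c => String.ofList [c])

-- pass-1 loop step of B: state (bounds, start, i) — only integers are maintained
def pvB1 (s : List (Int × Int) × Int × Int) (op : String) : List (Int × Int) × Int × Int :=
  let (bounds, start, i) := s
  if op = "No op" then (bounds, start, i + 1)
  else if op = "Sub" ∨ op = "Delete" then (bounds ++ [(start, i)], i + 1, i + 1)
  else if op = "Insert" then (bounds ++ [(start, i)], i, i)
  else (bounds, start, i)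

def commonSubstrings_alt (x : String) (L : Int) (a : List String) : List (List String) :=
  let st := a.foldl pvB1 ([], 0, 0)
  ((st.1.filter (fun p => L < p.2 - p.1)).map (fun p => pvRun x p.1 p.2)) ++
    (if L ≤ st.2.2 - st.2.1 then [pvRun x st.2.1 st.2.2] else [])

-- ===== PRECONDITION & SPEC =====
-- Pre_ excludes exactly the inputs where A raises IndexError: at the k-th op, x is indexed at
-- position = number of earlier 'No op'/'Sub'/'Delete' ops, and that read happens on 'No op'.
-- counts the ops that advance the index i into x
def pvAdvances (op : String) : Bool := op = "No op" || op = "Sub" || op = "Delete"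

def Pre_commonSubstrings (x : String) (L : Int) (a : List String) : Prop :=
  ∀ k : Nat, k < a.length → a[k]? = some "No op" →
    (((a.take k).countP pvAdvances : Int) < (x.toList.length : Int))
instance (x : String) (L : Int) (a : List String) : Decidable (Pre_commonSubstrings x L a) := by
  unfold Pre_commonSubstrings; infer_instance
def pvWitness_commonSubstrings : String × Int × List String := ("abc", 0, ["No op", "Sub", "No op", "Insert"])

def Spec_commonSubstrings (x : String) (L : Int) (a : List String) (out : List (List String)) : Prop := out = commonSubstrings_alt x L a
instance (x : String) (L : Int) (a : List String) (out : List (List String)) : Decidable (Spec_commonSubstrings x L a out) := by unfold Spec_commonSubstrings; infer_instance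

-- ===== CLAIM (what is proved, stated in full; the proofs are below) =====
def Claim_equal_commonSubstrings : Prop := ∀ (x : String) (L : Int) (a : List String), Dom_commonSubstrings x L a → Pre_commonSubstrings x L a → Spec_commonSubstrings x L a (commonSubstrings x L a)

-- ===== LEMMAS AND PROOFS =====

lemma pvRun_nil (x : String) (s : Nat) : pvRun x (s : Int) (s : Int) = [] := by
  simp [pvRun, PySem.List.slice_natCast]

lemma pvRun_length (x : String) (s i : Nat) (h1 : s ≤ i)
    (h2 : i ≤ x.toList.length ∨ i = s) :
    ((pvRun x (s : Int) (i : Int)).length : Int) = (i : Int) - (s : Int) := by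
  rcases h2 with h2 | h2
  · have hlen : x.length = x.toList.length := (String.length_toList).symm
    simp [pvRun, PySem.List.slice_natCast]
    omega
  · subst h2; simp [pvRun_nil]

lemma pvRun_snoc (x : String) (s i : Nat) (h1 : s ≤ i) (h2 : i < x.toList.length) :
    pvRun x (s : Int) ((i : Int) + 1) = pvRun x (s : Int) (i : Int) ++ [pvChar x (i : Int)] := by
  have hcast : ((i : Int) + 1) = ((i + 1 : Nat) : Int) := by push_cast; ring
  rw [hcast]
  simp only [pvRun, PySem.List.slice_natCast]
  have hs : i + 1 - s = (i - s) + 1 := by omega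
  rw [hs, List.take_add_one]
  have hidx : (x.toList.drop s)[i - s]? = some x.toList[i] := by
    rw [List.getElem?_drop]
    have : s + (i - s) = i := by omega
    rw [this]
    exact List.getElem?_eq_getElem h2
  rw [hidx]
  simp [pvChar, List.getElem?_eq_getElem h2]

-- the main loop invariant: A's fold state is B's fold state with the bounds materialized
lemma pv_fold_inv (x : String) (L : Int) :
    ∀ (a : List String) (bounds : List (Int × Int)) (start i : Nat),
      start ≤ i → (i ≤ x.toList.length ∨ i = start) →
      (∀ k : Nat, a[k]? = some "No op" →
        ((i : Int) + ((a.take k).countP pvAdvances : Int) < (x.toList.length : Int))) →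
      ∃ (bounds' : List (Int × Int)) (start' i' : Nat),
        a.foldl pvB1 (bounds, (start : Int), (i : Int)) = (bounds', (start' : Int), (i' : Int)) ∧
        start' ≤ i' ∧ (i' ≤ x.toList.length ∨ i' = start') ∧
        a.foldl (pvAStep x L)
          ((bounds.filter (fun p => L < p.2 - p.1)).map (fun p => pvRun x p.1 p.2),
            pvRun x (start : Int) (i : Int), (i : Int))
          = ((bounds'.filter (fun p => L < p.2 - p.1)).map (fun p => pvRun x p.1 p.2),
              pvRun x (start' : Int) (i' : Int), (i' : Int)) := by
  intro a
  induction a with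
  | nil =>
    intro bounds start i h1 h2 _
    exact ⟨bounds, start, i, rfl, h1, h2, rfl⟩
  | cons op rest ih =>
    intro bounds start i h1 h2 hpre
    have hcast : ((i + 1 : Nat) : Int) = (i : Int) + 1 := by push_cast; ring
    by_cases hop : op = "No op"
    · have hin : i < x.toList.length := by
        have h := hpre 0 (by simp [hop])
        have hxl : x.toList.length = x.length := String.length_toList
        simp at h
        omega
      have hadv : pvAdvances op = true := by simp [pvAdvances, hop]
      have hrest : ∀ k : Nat, rest[k]? = some "No op" →
          (((i + 1 : Nat) : Int) + ((rest.take k).countP pvAdvances : Int) < (x.toList.length : Int)) := by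
        intro k hk
        have h := hpre (k + 1) (by simpa using hk)
        have hxl : x.toList.length = x.length := String.length_toList
        simp [List.take_succ_cons, hadv] at h
        push_cast
        omega
      obtain ⟨b', s', i', hB, hle, hbd, hA⟩ := ih bounds start (i + 1) (by omega) (by omega) hrest
      rw [hcast] at hB hA
      refine ⟨b', s', i', ?_, hle, hbd, ?_⟩
      · rw [List.foldl_cons]
        have hB1 : pvB1 (bounds, (start : Int), (i : Int)) op = (bounds, (start : Int), (i : Int) + 1) := by
          simp [pvB1, hop]
        rw [hB1]; exact hB
      · rw [List.foldl_cons]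
        have hstep : pvAStep x L ((bounds.filter (fun p => L < p.2 - p.1)).map (fun p => pvRun x p.1 p.2), pvRun x (start : Int) (i : Int), (i : Int)) op
            = ((bounds.filter (fun p => L < p.2 - p.1)).map (fun p => pvRun x p.1 p.2), pvRun x (start : Int) ((i : Int) + 1), (i : Int) + 1) := by
          simp only [pvAStep, hop, if_true]
          rw [pvRun_snoc x start i h1 hin]
        rw [hstep]; exact hA
    · by_cases hop2 : op = "Sub" ∨ op = "Delete"
      · have hadv : pvAdvances op = true := by
          rcases hop2 with h | h <;> simp [pvAdvances, h]
        have hrest : ∀ k : Nat, rest[k]? = some "No op" →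
            (((i + 1 : Nat) : Int) + ((rest.take k).countP pvAdvances : Int) < (x.toList.length : Int)) := by
          intro k hk
          have h := hpre (k + 1) (by simpa using hk)
          have hxl : x.toList.length = x.length := String.length_toList
          simp [List.take_succ_cons, hadv] at h
          push_cast
          omega
        obtain ⟨b', s', i', hB, hle, hbd, hA⟩ :=
          ih (bounds ++ [((start : Int), (i : Int))]) (i + 1) (i + 1) (le_refl _) (Or.inr rfl) hrest
        rw [hcast] at hB hA
        refine ⟨b', s', i', ?_, hle, hbd, ?_⟩
        · rw [List.foldl_cons]
          have hB1 : pvB1 (bounds, (start : Int), (i : Int)) op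
              = (bounds ++ [((start : Int), (i : Int))], (i : Int) + 1, (i : Int) + 1) := by
            simp [pvB1, hop, hop2]
          rw [hB1]; exact hB
        · rw [List.foldl_cons]
          have hlen := pvRun_length x start i h1 h2
          have hstep : pvAStep x L ((bounds.filter (fun p => L < p.2 - p.1)).map (fun p => pvRun x p.1 p.2), pvRun x (start : Int) (i : Int), (i : Int)) op
              = (((bounds ++ [((start : Int), (i : Int))]).filter (fun p => L < p.2 - p.1)).map (fun p => pvRun x p.1 p.2), pvRun x ((i : Int) + 1) ((i : Int) + 1), (i : Int) + 1) := by
            have hnil : pvRun x ((i : Int) + 1) ((i : Int) + 1) = [] := by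
              rw [← hcast]; exact pvRun_nil x (i + 1)
            rcases hop2 with h | h <;>
            · simp only [pvAStep, hop, h, String.reduceEq, if_true, if_false, List.filter_append,
                List.filter_singleton, List.map_append, hnil]
              rw [hlen]
              split_ifs with hc <;> simp [hc]
          rw [hstep]
          rw [← hcast, pvRun_nil x (i + 1), hcast] at hA
          convert hA using 3
          rw [← hcast, pvRun_nil x (i + 1)]
      · have h2' : ¬ op = "Sub" := fun h => hop2 (Or.inl h)
        have h2'' : ¬ op = "Delete" := fun h => hop2 (Or.inr h)
        have hadv : pvAdvances op = false := by simp [pvAdvances, hop, h2', h2'']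
        by_cases hop3 : op = "Insert"
        · have hrest : ∀ k : Nat, rest[k]? = some "No op" →
              ((i : Int) + ((rest.take k).countP pvAdvances : Int) < (x.toList.length : Int)) := by
            intro k hk
            have h := hpre (k + 1) (by simpa using hk)
            have hxl : x.toList.length = x.length := String.length_toList
            simp [List.take_succ_cons, hadv] at h
            push_cast
            omega
          obtain ⟨b', s', i', hB, hle, hbd, hA⟩ :=
            ih (bounds ++ [((start : Int), (i : Int))]) i i (le_refl _) (Or.inr rfl) hrest
          refine ⟨b', s', i', ?_, hle, hbd, ?_⟩
          · rw [List.foldl_cons]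
            have hB1 : pvB1 (bounds, (start : Int), (i : Int)) op
                = (bounds ++ [((start : Int), (i : Int))], (i : Int), (i : Int)) := by
              simp [pvB1, hop, hop2, hop3]
            rw [hB1]; exact hB
          · rw [List.foldl_cons]
            have hlen := pvRun_length x start i h1 h2
            have hstep : pvAStep x L ((bounds.filter (fun p => L < p.2 - p.1)).map (fun p => pvRun x p.1 p.2), pvRun x (start : Int) (i : Int), (i : Int)) op
                = (((bounds ++ [((start : Int), (i : Int))]).filter (fun p => L < p.2 - p.1)).map (fun p => pvRun x p.1 p.2), pvRun x (i : Int) (i : Int), (i : Int)) := by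
              simp only [pvAStep, hop, h2', h2'', hop3, String.reduceEq, if_true, if_false,
                List.filter_append, List.filter_singleton, List.map_append, pvRun_nil x i]
              rw [hlen]
              split_ifs with hc <;> simp [hc]
            rw [hstep]; exact hA
        · have hrest : ∀ k : Nat, rest[k]? = some "No op" →
              ((i : Int) + ((rest.take k).countP pvAdvances : Int) < (x.toList.length : Int)) := by
            intro k hk
            have h := hpre (k + 1) (by simpa using hk)
            have hxl : x.toList.length = x.length := String.length_toList
            simp [List.take_succ_cons, hadv] at h
            push_cast
            omega
          obtain ⟨b', s', i', hB, hle, hbd, hA⟩ := ih bounds start i h1 h2 hrest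
          refine ⟨b', s', i', ?_, hle, hbd, ?_⟩
          · rw [List.foldl_cons]
            have hB1 : pvB1 (bounds, (start : Int), (i : Int)) op = (bounds, (start : Int), (i : Int)) := by
              simp [pvB1, hop, hop2, hop3]
            rw [hB1]; exact hB
          · rw [List.foldl_cons]
            have hstep : pvAStep x L ((bounds.filter (fun p => L < p.2 - p.1)).map (fun p => pvRun x p.1 p.2), pvRun x (start : Int) (i : Int), (i : Int)) op
                = ((bounds.filter (fun p => L < p.2 - p.1)).map (fun p => pvRun x p.1 p.2), pvRun x (start : Int) (i : Int), (i : Int)) := by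
              simp [pvAStep, hop, h2', h2'', hop3]
            rw [hstep]; exact hA

-- ===== VERDICT (by name: the statement is the Claim_ definition above) =====
theorem commonSubstrings_spec : Claim_equal_commonSubstrings := by
  intro x L a _ hpre
  unfold Spec_commonSubstrings commonSubstrings commonSubstrings_alt
  have hpre' : ∀ k : Nat, a[k]? = some "No op" →
      (((0 : Nat) : Int) + ((a.take k).countP pvAdvances : Int) < (x.toList.length : Int)) := by
    intro k hk
    have hk' : k < a.length := by
      by_contra h
      rw [List.getElem?_eq_none (by omega)] at hk
      simp at hk
    simpa using hpre k hk' hk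
  obtain ⟨b', s', i', hB, hle, hbd, hA⟩ := pv_fold_inv x L a [] 0 0 (le_refl _) (Or.inr rfl) hpre'
  rw [show ((0:Nat):Int) = (0:Int) by rfl] at hB hA
  have h0 : pvRun x 0 0 = [] := by simpa using pvRun_nil x 0
  rw [h0] at hA
  simp only [List.filter_nil, List.map_nil] at hA
  rw [hA, hB]
  simp only
  rw [pvRun_length x s' i' hle hbd]
  split_ifs <;> simp
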